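-- pv_equiv track=rewrite | github.com/bifurcate/mixed-platonic | src/binary_loop.py | get_binary_tuples
-- ===== SOURCE A (Python) =====
-- def get_binary_tuples(n, k):
--     """
--     Generates all binary tuples of length n with exactly k ones (weight k).
--
--     Args:
--         n: The length of the binary tuples
--         k: The number of ones (weight) in each tuple
--
--     Returns:
--         A list of tuples, each containing a binary tuple with exactly k ones
--     """
--     import itertools
--
--     if k > n or k < 0:
--         return []
--
--     # Generate all combinations of k positions out of n
--     tuples = []
--     for positions in itertools.combinations(range(n), k):
--         # Create a tuple with zeros, then set ones at the chosen positions
--         binary_tuple = [0] * n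
--         for pos in positions:
--             binary_tuple[pos] = 1
--         tuples.append(tuple(binary_tuple))
--
--     return tuples
-- ===== SOURCE B (Python) =====
-- def get_binary_tuples(n, k):
--     """
--     Generates all binary tuples of length n with exactly k ones (weight k),
--     by iterative depth-first backtracking over positions with an explicit
--     stack and one shared buffer: at each position try a 1 before a 0 (which
--     reproduces the combinations-based ordering), emitting directly once the
--     remaining suffix is forced to be all zeros or all ones.
--     """
--     if k > n or k < 0:
--         return []
--
--     out = []
--     buf = [0] * n
--     # stack items: (depth, bit, r, p) = write `bit` at buf[depth-1] (None for
--     # the root), then r ones remain to place in the p untouched slots.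
--     stack = [(0, None, k, n)]
--     while stack:
--         d, bit, r, p = stack.pop()
--         if bit is not None:
--             buf[d - 1] = bit
--         if r == 0:
--             buf[d:] = [0] * p
--             out.append(tuple(buf))
--         elif r == p:
--             buf[d:] = [1] * p
--             out.append(tuple(buf))
--         else:
--             stack.append((d + 1, 0, r, p - 1))
--             stack.append((d + 1, 1, r - 1, p - 1))
--     return out
-- ===== Notes on version B (the rewrite author's own statement) =====
-- stated objective: alternative
-- what changed: Replaces itertools.combinations position-set enumeration (building each tuple by setting ones into a zero list) with direct recursive backtracking that extends a prefix with 1-before-0, emitting tuples in the same order.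
import Mathlib
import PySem

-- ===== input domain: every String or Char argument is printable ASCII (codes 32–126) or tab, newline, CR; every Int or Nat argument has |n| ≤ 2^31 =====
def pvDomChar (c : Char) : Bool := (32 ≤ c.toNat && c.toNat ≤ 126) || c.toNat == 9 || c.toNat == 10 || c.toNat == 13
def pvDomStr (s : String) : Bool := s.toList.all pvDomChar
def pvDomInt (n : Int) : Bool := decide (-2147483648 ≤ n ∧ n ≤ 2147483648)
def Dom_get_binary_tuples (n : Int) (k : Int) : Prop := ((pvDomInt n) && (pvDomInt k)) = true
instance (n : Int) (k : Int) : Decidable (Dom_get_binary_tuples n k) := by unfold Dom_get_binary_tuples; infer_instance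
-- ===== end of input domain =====

-- B replaces combinations-of-positions enumeration by an iterative explicit-stack 1-before-0
-- backtracker over a shared buffer (alternative decomposition, same order and asymptotic cost).

-- ===== PORT A =====
-- itertools.combinations(range(n), k) ported by hand (PySem has no combinations):
-- recursive definition producing the k-subsets of the list in exactly itertools' lexicographic order.
-- Elements of range(n) are nonnegative, so they are carried as Nat positions.
def pvCombos : List Nat → Nat → List (List Nat)
  | _, 0 => [[]]
  | [], _ + 1 => []
  | x :: xs, j + 1 => (pvCombos xs j).map (fun c => x :: c) ++ pvCombos xs (j + 1)

-- inner loop: `for pos in positions: binary_tuple[pos] = 1`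
def pvSetOnes (t : List Int) (positions : List Nat) : List Int :=
  positions.foldl (fun acc pos => acc.set pos 1) t

def get_binary_tuples (n : Int) (k : Int) : List (List Int) :=
  if k > n ∨ k < 0 then []
  else
    -- the appending loop over combinations is the map of the body
    (pvCombos (List.range n.toNat) k.toNat).map
      (fun positions => pvSetOnes (List.replicate n.toNat 0) positions)

-- ===== PORT B =====
-- The while-loop over the explicit stack. Stack items are (d, bit, r, p): write `bit` at
-- buf[d-1] (none only for the root item, which has d = 0), then r ones remain to place in the
-- p untouched slots. `stack.pop()` takes the head of the Lean list, so Python's two appends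
-- (0-child first, then 1-child) become the head items 1-child-then-0-child here.
-- Python's `buf[d:] = [0]*p` / `[1]*p` is `buf1.take d ++ List.replicate p _`, exact on every
-- state the loop reaches (there d + p = buf.length).
-- `termination_by` measure: each item weighs 3^p; emitting removes an item, branching replaces
-- weight 3^(q+1) by 2·3^q. The `| 0 => out` arm of the final match is unreachable from the
-- entry state (there 0 < r < p) and only makes the recursion well-founded.
def pvMeasure (stack : List (Nat × Option Int × Int × Nat)) : Nat :=
  (stack.map (fun it => 3 ^ it.2.2.2)).sum

def pvLoop (buf : List Int) (stack : List (Nat × Option Int × Int × Nat))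
    (out : List (List Int)) : List (List Int) :=
  match stack with
  | [] => out
  | (d, bit, r, p) :: rest =>
    let buf1 := match bit with
      | none => buf
      | some b => buf.set (d - 1) b
    if r = 0 then
      pvLoop (buf1.take d ++ List.replicate p 0) rest (out ++ [buf1.take d ++ List.replicate p 0])
    else if r = (p : Int) then
      pvLoop (buf1.take d ++ List.replicate p 1) rest (out ++ [buf1.take d ++ List.replicate p 1])
    else
      match p with
      | 0 => out
      | q + 1 =>
          pvLoop buf1 ((d + 1, some 1, r - 1, q) :: (d + 1, some 0, r, q) :: rest) out
termination_by pvMeasure stack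
decreasing_by
  · simp only [pvMeasure, List.map_cons, List.sum_cons]
    have h3 : 0 < 3 ^ p := Nat.pow_pos (by norm_num)
    omega
  · simp only [pvMeasure, List.map_cons, List.sum_cons]
    have h3 : 0 < 3 ^ p := Nat.pow_pos (by norm_num)
    omega
  · simp only [pvMeasure, List.map_cons, List.sum_cons]
    have h3 : 0 < 3 ^ q := Nat.pow_pos (by norm_num)
    omega

def get_binary_tuples_alt (n : Int) (k : Int) : List (List Int) :=
  if k > n ∨ k < 0 then []
  else pvLoop (List.replicate n.toNat 0) [(0, none, k, n.toNat)] []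

-- ===== PRECONDITION & SPEC =====
def Spec_get_binary_tuples (n : Int) (k : Int) (out : List (List Int)) : Prop := out = get_binary_tuples_alt n k
instance (n : Int) (k : Int) (out : List (List Int)) : Decidable (Spec_get_binary_tuples n k out) := by unfold Spec_get_binary_tuples; infer_instance

-- ===== CLAIM (what is proved, stated in full; the proofs are below) =====
def Claim_equal_get_binary_tuples : Prop := ∀ (n : Int) (k : Int), Dom_get_binary_tuples n k → Spec_get_binary_tuples n k (get_binary_tuples n k)

-- ===== LEMMAS AND PROOFS =====

-- Common recursive specification both ports are reduced to: the tuples (as pfx ++ suffix)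
-- obtainable by extending pfx with p more bits containing exactly r ones, 1-before-0 order.
def pvGoB (pfx : List Int) (r : Int) : Nat → List (List Int)
  | 0 => [pfx]
  | q + 1 =>
      (if r > 0 then pvGoB (pfx ++ [1]) (r - 1) q else []) ++
      (if r < (q : Int) + 1 then pvGoB (pfx ++ [0]) r q else [])

-- ---- A-side: combinations enumeration = pvGoB ----

lemma pvCombos_map (f : Nat → Nat) (xs : List Nat) (j : Nat) :
    pvCombos (xs.map f) j = (pvCombos xs j).map (List.map f) := by
  induction xs generalizing j with
  | nil => cases j <;> simp [pvCombos]
  | cons x xs ih =>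
      cases j with
      | zero => simp [pvCombos]
      | succ j => simp [pvCombos, ih, Function.comp]

lemma pvCombos_nil_of_lt (xs : List Nat) (j : Nat) (h : xs.length < j) : pvCombos xs j = [] := by
  induction xs generalizing j with
  | nil => cases j with
      | zero => omega
      | succ j => simp [pvCombos]
  | cons x xs ih =>
      cases j with
      | zero => omega
      | succ j =>
          simp at h
          simp [pvCombos, ih j (by omega), ih (j+1) (by omega)]

lemma pvSetOnes_shift (a : Int) (t : List Int) (ps : List Nat) :
    pvSetOnes (a :: t) (ps.map Nat.succ) = a :: pvSetOnes t ps := by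
  induction ps generalizing t with
  | nil => simp [pvSetOnes]
  | cons p ps ih => simp [pvSetOnes, List.foldl] at ih ⊢; exact ih _

lemma pvSetOnes_head (a : Int) (t : List Int) (ps : List Nat) :
    pvSetOnes (a :: t) (0 :: ps.map Nat.succ) = 1 :: pvSetOnes t ps := by
  simpa [pvSetOnes, List.foldl] using pvSetOnes_shift 1 t ps

lemma pvGoB_eq (p : Nat) : ∀ (r : Nat) (pfx : List Int), r ≤ p →
    pvGoB pfx (r : Int) p =
      (pvCombos (List.range p) r).map
        (fun ps => pfx ++ pvSetOnes (List.replicate p 0) ps) := by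
  induction p with
  | zero =>
      intro r pfx hr
      interval_cases r
      simp [pvGoB, pvCombos, pvSetOnes]
  | succ q ih =>
      intro r pfx hr
      rw [List.range_succ_eq_map]
      cases r with
      | zero =>
          have h2 := ih 0 (pfx ++ [0]) (Nat.zero_le _)
          simp [pvGoB, pvCombos, pvSetOnes] at h2 ⊢
          simpa using h2
      | succ s =>
          have h1 : pvGoB (pfx ++ [1]) ((s : Int)) q =
              (pvCombos (List.range q) s).map
                (fun ps => (pfx ++ [1]) ++ pvSetOnes (List.replicate q 0) ps) :=
            ih s (pfx ++ [1]) (by omega)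
          have hpos : ((s : Int) + 1) > 0 := by positivity
          rw [pvCombos]
          rw [pvCombos_map Nat.succ (List.range q) s, pvCombos_map Nat.succ (List.range q) (s+1)]
          by_cases hsq : s + 1 ≤ q
          · have h2 : pvGoB (pfx ++ [0]) ((s : Int) + 1) q =
                (pvCombos (List.range q) (s + 1)).map
                  (fun ps => (pfx ++ [0]) ++ pvSetOnes (List.replicate q 0) ps) := by
              have := ih (s + 1) (pfx ++ [0]) hsq
              simpa using this
            have hlt : ((s : Int) + 1) < (q : Int) + 1 := by exact_mod_cast Nat.lt_succ_of_le hsq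
            show pvGoB pfx ((s : Int) + 1) (q + 1) = _
            rw [pvGoB]
            rw [if_pos hpos, if_pos hlt]
            simp only [add_sub_cancel_right] at *
            rw [h1, h2]
            simp only [List.map_append, List.map_map]
            refine congrArg₂ (· ++ ·) ?_ ?_ <;>
              · apply List.map_congr_left
                intro a _
                simp [Function.comp, List.replicate_succ, pvSetOnes_head, pvSetOnes_shift]
          · have hsq' : s = q := by omega
            subst hsq'
            have hempty : pvCombos (List.range s) (s + 1) = [] :=
              pvCombos_nil_of_lt _ _ (by simp)
            have hnlt : ¬ ((s : Int) + 1) < (s : Int) + 1 := by omega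
            show pvGoB pfx ((s : Int) + 1) (s + 1) = _
            rw [pvGoB]
            rw [if_pos hpos, if_neg hnlt]
            simp only [add_sub_cancel_right] at *
            rw [h1, hempty]
            simp only [List.map_nil, List.append_nil, List.map_map]
            apply List.map_congr_left
            intro a _
            simp [Function.comp, List.replicate_succ, pvSetOnes_head]

-- ---- B-side: explicit-stack loop = pvGoB ----

lemma pvGoB_zero (p : Nat) : ∀ pfx : List Int, pvGoB pfx 0 p = [pfx ++ List.replicate p 0] := by
  induction p with
  | zero => intro pfx; simp [pvGoB]
  | succ q ih =>
      intro pfx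
      have : ((0 : Int) < (q : Int) + 1) := by positivity
      simp [pvGoB, this, ih, List.replicate_succ]

lemma pvGoB_full (p : Nat) : ∀ pfx : List Int, pvGoB pfx (p : Int) p = [pfx ++ List.replicate p 1] := by
  induction p with
  | zero => intro pfx; simp [pvGoB]
  | succ q ih =>
      intro pfx
      have h1 : ((q : Int) + 1) > 0 := by positivity
      have h2 : ¬ ((q : Int) + 1 < (q : Int) + 1) := by omega
      simp [pvGoB, h1, ih, List.replicate_succ]

-- the tuples an item still to be processed will contribute, as a function of the buffer
def pvItemOut (buf : List Int) : Nat × Option Int × Int × Nat → List (List Int)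
  | (d, bit, r, p) =>
      pvGoB ((match bit with
              | none => buf
              | some b => buf.set (d - 1) b).take d) r p

-- loop invariant on the stack: d + p = n, 0 ≤ r ≤ p, bit = none only at the root (d = 0),
-- and depths are weakly decreasing down the stack
def pvWFit (n : Nat) (it : Nat × Option Int × Int × Nat) : Prop :=
  it.1 + it.2.2.2 = n ∧ 0 ≤ it.2.2.1 ∧ it.2.2.1 ≤ (it.2.2.2 : Int) ∧ (it.2.1 = none → it.1 = 0)

def pvWF (n : Nat) (stack : List (Nat × Option Int × Int × Nat)) : Prop :=
  (∀ it ∈ stack, pvWFit n it) ∧ stack.Pairwise (fun a b => b.1 ≤ a.1)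

lemma pvTake_set (l : List Int) (d : Nat) (b : Int) (h : d < l.length) :
    (l.set d b).take (d + 1) = l.take d ++ [b] := by
  apply List.ext_getElem?
  intro j
  simp [List.getElem?_take, List.getElem?_set, List.getElem?_append]
  split_ifs <;> first | omega | (try simp_all) <;> (try omega) <;>
    (have : j - min j l.length = 0 := by omega) <;> simp_all

-- an item's contribution only depends on the buffer strictly below d-1 (its own write masks d-1)
lemma pvItemOut_congr (buf buf' : List Int) (d : Nat) (it : Nat × Option Int × Int × Nat)
    (hlen : buf.length = buf'.length)
    (hag : ∀ j : Nat, j < d - 1 → buf[j]? = buf'[j]?)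
    (hd : it.1 ≤ d) (hbit : it.2.1 = none → it.1 = 0) :
    pvItemOut buf it = pvItemOut buf' it := by
  obtain ⟨d'', bit, r, p⟩ := it
  simp only at hd hbit
  cases bit with
  | none =>
      have h0 : d'' = 0 := hbit rfl
      subst h0
      simp [pvItemOut]
  | some b =>
      simp only [pvItemOut]
      congr 1
      apply List.ext_getElem?
      intro j
      simp only [List.getElem?_take, List.getElem?_set]
      by_cases hj : j < d''
      · by_cases he : d'' - 1 = j
        · simp [he, ← hlen]
        · have hlt : j < d - 1 := by omega
          simp [hj, he, hag j hlt]
      · simp [hj]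

lemma pvMap_itemOut_congr (buf buf' : List Int) (d : Nat)
    (rest : List (Nat × Option Int × Int × Nat)) (n : Nat)
    (hlen : buf.length = buf'.length)
    (hag : ∀ j : Nat, j < d - 1 → buf[j]? = buf'[j]?)
    (hmem : ∀ it ∈ rest, it.1 ≤ d) (hwf : ∀ it ∈ rest, pvWFit n it) :
    rest.map (pvItemOut buf) = rest.map (pvItemOut buf') := by
  apply List.map_congr_left
  intro it hit
  exact pvItemOut_congr buf buf' d it hlen hag (hmem it hit) ((hwf it hit).2.2.2)

lemma pvLoop_spec : ∀ (buf : List Int) (stack : List (Nat × Option Int × Int × Nat))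
    (out : List (List Int)) (n : Nat), buf.length = n → pvWF n stack →
    pvLoop buf stack out = out ++ (stack.map (pvItemOut buf)).flatten := by
  intro buf stack out
  induction buf, stack, out using pvLoop.induct with
  | case1 buf out => intro n _ _; simp [pvLoop]
  | case2 buf out d bit p rest buf1 ih =>
      intro n hlen hwf
      obtain ⟨hmem, hpw⟩ := hwf
      obtain ⟨hdp, hr0, hrple, hnone⟩ := hmem _ (List.mem_cons_self ..)
      simp only at hdp hr0 hrple hnone
      have hrest : ∀ it ∈ rest, it.1 ≤ d := (List.pairwise_cons.mp hpw).1
      have hwfrest : pvWF n rest := ⟨fun it hit => hmem it (List.mem_cons_of_mem _ hit),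
        (List.pairwise_cons.mp hpw).2⟩
      cases bit with
      | none =>
          have hb : buf1 = buf := rfl
          have hd0 : d = 0 := hnone rfl
          subst hd0
          rw [pvLoop.eq_def]
          simp only [hb, List.take_zero, List.nil_append, reduceIte] at ih ⊢
          rw [ih n (by simp; omega) hwfrest]
          rw [pvMap_itemOut_congr (List.replicate p 0) buf 0 rest n (by simp [hlen]; omega)
            (by intro j hj; exact absurd hj (by omega)) hrest hwfrest.1]
          simp [pvItemOut, pvGoB_zero]
      | some b =>
          have hb : buf1 = buf.set (d - 1) b := rfl
          have hlen1 : (buf.set (d - 1) b).length = n := by simp [hlen]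
          have hdle : d ≤ n := by omega
          have hnew : ((buf.set (d - 1) b).take d ++ List.replicate p 0).length = n := by
            simp [hlen1]; omega
          rw [pvLoop.eq_def]
          simp only [hb, reduceIte] at ih ⊢
          rw [ih n hnew hwfrest]
          have hag : ∀ j : Nat, j < d - 1 →
              ((buf.set (d - 1) b).take d ++ List.replicate p 0)[j]? = buf[j]? := by
            intro j hj
            have hjd : j < d := by omega
            have hne : d - 1 ≠ j := by omega
            rw [List.getElem?_append_left (by simp [hlen1]; omega)]
            simp [hjd, hne]
          rw [pvMap_itemOut_congr _ buf d rest n (by omega) hag hrest hwfrest.1]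
          simp [pvItemOut, pvGoB_zero]
  | case3 buf out d bit p rest buf1 hp0 ih =>
      intro n hlen hwf
      obtain ⟨hmem, hpw⟩ := hwf
      obtain ⟨hdp, hr0, hrple, hnone⟩ := hmem _ (List.mem_cons_self ..)
      simp only at hdp hr0 hrple hnone
      have hrest : ∀ it ∈ rest, it.1 ≤ d := (List.pairwise_cons.mp hpw).1
      have hwfrest : pvWF n rest := ⟨fun it hit => hmem it (List.mem_cons_of_mem _ hit),
        (List.pairwise_cons.mp hpw).2⟩
      cases bit with
      | none =>
          have hb : buf1 = buf := rfl
          have hd0 : d = 0 := hnone rfl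
          subst hd0
          rw [pvLoop.eq_def]
          simp only [hb, List.take_zero, List.nil_append, if_neg hp0, reduceIte] at ih ⊢
          rw [ih n (by simp; omega) hwfrest]
          rw [pvMap_itemOut_congr (List.replicate p 1) buf 0 rest n (by simp [hlen]; omega)
            (by intro j hj; exact absurd hj (by omega)) hrest hwfrest.1]
          simp [pvItemOut, pvGoB_full]
      | some b =>
          have hb : buf1 = buf.set (d - 1) b := rfl
          have hlen1 : (buf.set (d - 1) b).length = n := by simp [hlen]
          have hdle : d ≤ n := by omega
          have hnew : ((buf.set (d - 1) b).take d ++ List.replicate p 1).length = n := by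
            simp [hlen1]; omega
          rw [pvLoop.eq_def]
          simp only [hb, if_neg hp0, reduceIte] at ih ⊢
          rw [ih n hnew hwfrest]
          have hag : ∀ j : Nat, j < d - 1 →
              ((buf.set (d - 1) b).take d ++ List.replicate p 1)[j]? = buf[j]? := by
            intro j hj
            have hjd : j < d := by omega
            have hne : d - 1 ≠ j := by omega
            rw [List.getElem?_append_left (by simp [hlen1]; omega)]
            simp [hjd, hne]
          rw [pvMap_itemOut_congr _ buf d rest n (by omega) hag hrest hwfrest.1]
          simp [pvItemOut, pvGoB_full]
  | case4 buf out d bit r rest hr hrp =>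
      intro n hlen hwf
      obtain ⟨hmem, -⟩ := hwf
      obtain ⟨-, hr0, hrple, -⟩ := hmem _ (List.mem_cons_self ..)
      simp only at hr0 hrple
      exact absurd (by omega : r = 0) hr
  | case5 buf out d bit r rest buf1 hr q hrq ih =>
      intro n hlen hwf
      obtain ⟨hmem, hpw⟩ := hwf
      obtain ⟨hdp, hr0, hrple, hnone⟩ := hmem _ (List.mem_cons_self ..)
      simp only at hdp hr0 hrple hnone
      have hrest : ∀ it ∈ rest, it.1 ≤ d := (List.pairwise_cons.mp hpw).1
      have hwfrest : ∀ it ∈ rest, pvWFit n it :=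
        fun it hit => hmem it (List.mem_cons_of_mem _ hit)
      have hrpos : r > 0 := by
        rcases lt_or_eq_of_le hr0 with hlt | heq
        · exact hlt
        · exact absurd heq.symm hr
      have hrne : r ≠ (q : Int) + 1 := by
        intro hc; apply hrq; push_cast; omega
      have hrlt : r < (q : Int) + 1 := by
        have := hrple; omega
      have hwf' : pvWF n ((d + 1, some 1, r - 1, q) :: (d + 1, some 0, r, q) :: rest) := by
        constructor
        · intro it hit
          rcases List.mem_cons.mp hit with rfl | hit
          · refine ⟨by simp; omega, by simp; omega, by simp; omega, by simp⟩
          · rcases List.mem_cons.mp hit with rfl | hit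
            · refine ⟨by simp; omega, by simp; omega, by simp; omega, by simp⟩
            · exact hwfrest _ hit
        · refine List.pairwise_cons.mpr ⟨?_, List.pairwise_cons.mpr ⟨?_,
            (List.pairwise_cons.mp hpw).2⟩⟩
          · intro it hit
            rcases List.mem_cons.mp hit with rfl | hit
            · simp
            · exact le_trans (hrest _ hit) (by omega)
          · intro it hit
            exact le_trans (hrest _ hit) (by omega)
      cases bit with
      | none =>
          have hb : buf1 = buf := rfl
          have hd0 : d = 0 := hnone rfl
          subst hd0
          have hn : 0 < buf.length := by omega
          rw [pvLoop.eq_def]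
          simp only [hb, if_neg hr, if_neg hrq] at ih ⊢
          rw [ih n hlen hwf']
          have hsplit : pvItemOut buf (0, none, r, q + 1) =
              pvItemOut buf (1, some 1, r - 1, q) ++ pvItemOut buf (1, some 0, r, q) := by
            simp only [pvItemOut]
            rw [pvTake_set buf 0 1 hn, pvTake_set buf 0 0 hn]
            simp only [List.take_zero, List.nil_append]
            rw [pvGoB]
            rw [if_pos hrpos, if_pos hrlt]
            simp
          simp [hsplit]
      | some b =>
          have hb : buf1 = buf.set (d - 1) b := rfl
          have hlen1 : (buf.set (d - 1) b).length = n := by simp [hlen]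
          have hdlt : d < n := by omega
          rw [pvLoop.eq_def]
          simp only [hb, if_neg hr, if_neg hrq] at ih ⊢
          rw [ih n hlen1 hwf']
          have hsplit : pvItemOut buf (d, some b, r, q + 1) =
              pvItemOut (buf.set (d - 1) b) (d + 1, some 1, r - 1, q) ++
                pvItemOut (buf.set (d - 1) b) (d + 1, some 0, r, q) := by
            simp only [pvItemOut, Nat.add_sub_cancel]
            rw [pvTake_set _ d 1 (by simp [hlen1]; omega), pvTake_set _ d 0 (by simp [hlen1]; omega)]
            rw [pvGoB]
            rw [if_pos hrpos, if_pos hrlt]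
          have hag : ∀ j : Nat, j < d - 1 → (buf.set (d - 1) b)[j]? = buf[j]? := by
            intro j hj
            have hne : d - 1 ≠ j := by omega
            simp [hne]
          simp only [List.map_cons, List.flatten_cons]
          rw [pvMap_itemOut_congr (buf.set (d - 1) b) buf d rest n (by omega) hag hrest hwfrest]
          simp [hsplit]

-- ===== VERDICT (by name: the statement is the Claim_ definition above) =====
theorem get_binary_tuples_spec : Claim_equal_get_binary_tuples := by
  intro n k _
  unfold Spec_get_binary_tuples get_binary_tuples get_binary_tuples_alt
  by_cases h : k > n ∨ k < 0
  · simp [h]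
  · rw [if_neg h, if_neg h]
    push Not at h
    have hk0 : 0 ≤ k := h.2
    have hkn : k ≤ n := h.1
    have hn0 : 0 ≤ n := le_trans hk0 hkn
    have hle : k.toNat ≤ n.toNat := Int.toNat_le_toNat hkn
    have hwf : pvWF n.toNat [(0, none, k, n.toNat)] := by
      refine ⟨?_, by simp⟩
      intro it hit
      simp at hit
      subst hit
      refine ⟨by simp, hk0, ?_, fun _ => rfl⟩
      simpa [Int.toNat_of_nonneg hn0] using hkn
    rw [pvLoop_spec (List.replicate n.toNat 0) [(0, none, k, n.toNat)] [] n.toNat (by simp) hwf]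
    simp only [List.map_cons, List.map_nil, List.flatten, List.nil_append]
    simp only [pvItemOut, List.take_zero]
    have := pvGoB_eq n.toNat k.toNat [] hle
    rw [Int.toNat_of_nonneg hk0] at this
    simpa using this.symm
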